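-- pv_equiv track=rewrite | github.com/damzcore-dotcom/network_monitoring_system | backend/services/monitor.py | _is_ancestor_offline
-- ===== SOURCE A (Python) =====
-- def _is_ancestor_offline(device_id: int, device_map: dict, ping_results: dict) -> bool:
--     """Check if any ancestor of a device is offline (recursive)."""
--     device = device_map.get(device_id)
--     if not device:
--         return False
--
--     parent_id = device.get("parent_id")
--     if not parent_id:
--         return False
--
--     # Check parent status
--     parent_result = ping_results.get(parent_id)
--     if parent_result and parent_result[0] == "offline":
--         return True
--
--     # Recurse up the tree
--     return _is_ancestor_offline(parent_id, device_map, ping_results)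
-- ===== SOURCE B (Python) =====
-- def _is_ancestor_offline(device_id: int, device_map: dict, ping_results: dict) -> bool:
--     """Precompute the set of offline device ids once, then walk up the parent
--     chain iteratively (cycle-safe) returning True at the first offline ancestor."""
--     offline = {pid for pid, res in ping_results.items() if res[0] == "offline"}
--     seen = set()
--     cur = device_id
--     while cur not in seen:
--         seen.add(cur)
--         device = device_map.get(cur)
--         if not device:
--             return False
--         parent_id = device.get("parent_id")
--         if not parent_id:
--             return False
--         if parent_id in offline:
--             return True
--         cur = parent_id
--     return False
-- ===== Notes on version B (the rewrite author's own statement) =====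
-- stated objective: alternative
-- what changed: Replaces A's recursion that looks each parent up in ping_results with an iterative cycle-safe walk against a set of offline ids precomputed in one pass over ping_results.
import Mathlib
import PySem

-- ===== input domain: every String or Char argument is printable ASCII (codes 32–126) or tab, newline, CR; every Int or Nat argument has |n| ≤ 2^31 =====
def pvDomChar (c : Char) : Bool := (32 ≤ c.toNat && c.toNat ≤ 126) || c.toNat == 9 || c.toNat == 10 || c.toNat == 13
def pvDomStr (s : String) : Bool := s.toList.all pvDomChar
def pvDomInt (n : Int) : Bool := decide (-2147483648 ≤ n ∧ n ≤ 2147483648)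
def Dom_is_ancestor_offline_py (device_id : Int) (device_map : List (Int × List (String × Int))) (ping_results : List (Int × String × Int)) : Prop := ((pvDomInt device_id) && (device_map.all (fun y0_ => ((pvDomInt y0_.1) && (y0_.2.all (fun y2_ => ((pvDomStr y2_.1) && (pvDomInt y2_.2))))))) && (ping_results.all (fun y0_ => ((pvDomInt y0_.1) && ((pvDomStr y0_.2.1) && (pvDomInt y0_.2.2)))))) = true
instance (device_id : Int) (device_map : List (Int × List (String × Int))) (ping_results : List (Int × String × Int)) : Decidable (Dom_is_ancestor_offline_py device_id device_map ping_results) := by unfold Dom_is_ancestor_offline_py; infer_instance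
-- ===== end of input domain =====

-- B precomputes the set of offline ids in one pass over ping_results, then walks the
-- parent chain iteratively with a cycle guard (objective: alternative decomposition).
-- Equality is about the return value only; neither version mutates its arguments.

-- ===== PORT A =====
-- A is plain recursion up the parent chain; the fuel argument only makes it total
-- (under Pre_ the recursion returns within device_map.length + 1 steps, so the fuel never runs out).
def is_ancestor_offline_go (fuel : Nat) (device_id : Int) (device_map : List (Int × List (String × Int))) (ping_results : List (Int × String × Int)) : Bool :=
  match fuel with
  | 0 => false
  | fuel + 1 =>
    match (PySem.Dict.mk device_map).get? device_id with
    | none => false                                   -- `if not device` (None)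
    | some device =>
      if device = [] then false                       -- `if not device` (empty dict)
      else
        match (PySem.Dict.mk device).get? "parent_id" with
        | none => false                               -- `if not parent_id` (None)
        | some parent_id =>
          if parent_id = 0 then false                 -- `if not parent_id` (0)
          else
            match (PySem.Dict.mk ping_results).get? parent_id with
            | some parent_result =>
              if parent_result.1 = "offline" then true
              else is_ancestor_offline_go fuel parent_id device_map ping_results
            | none => is_ancestor_offline_go fuel parent_id device_map ping_results

def is_ancestor_offline_py (device_id : Int) (device_map : List (Int × List (String × Int))) (ping_results : List (Int × String × Int)) : Bool :=
  is_ancestor_offline_go (device_map.length + 2) device_id device_map ping_results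

-- ===== PORT B =====
-- The set comprehension `{pid for pid, res in ping_results.items() if res[0] == "offline"}`,
-- ported by hand over the association list: under the first-match dict model, items()
-- yields each key's FIRST occurrence, so later duplicates are skipped via `ks`.
def alt_offline (pr : List (Int × String × Int)) (ks : PySem.Set Int) (off : PySem.Set Int) : PySem.Set Int :=
  match pr with
  | [] => off
  | p :: rest =>
    if PySem.Set.contains ks p.1 then alt_offline rest ks off
    else alt_offline rest (PySem.Set.add ks p.1)
      (if p.2.1 = "offline" then PySem.Set.add off p.1 else off)

-- The while loop of Source B: walk up the chain, cycle-guarded by `seen`, returning True at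
-- the first parent found in `offS`.  The fuel only makes it total; since every visited
-- node after the first must be a distinct key of device_map, the loop runs at most
-- device_map.length + 1 times and the fuel device_map.length + 2 is never exhausted.
def alt_walk (fuel : Nat) (cur : Int) (seen : PySem.Set Int) (offS : PySem.Set Int) (device_map : List (Int × List (String × Int))) : Bool :=
  match fuel with
  | 0 => false
  | fuel + 1 =>
    if PySem.Set.contains seen cur then false         -- `while cur not in seen` falls through
    else
      let seen := PySem.Set.add seen cur
      match (PySem.Dict.mk device_map).get? cur with
      | none => false                                 -- `if not device: return False`
      | some device =>
        if device = [] then false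
        else
          match (PySem.Dict.mk device).get? "parent_id" with
          | none => false                             -- `if not parent_id: return False`
          | some parent_id =>
            if parent_id = 0 then false
            else if PySem.Set.contains offS parent_id then true   -- `if parent_id in offline`
            else alt_walk fuel parent_id seen offS device_map

def is_ancestor_offline_py_alt (device_id : Int) (device_map : List (Int × List (String × Int))) (ping_results : List (Int × String × Int)) : Bool :=
  alt_walk (device_map.length + 2) device_id PySem.Set.empty
    (alt_offline ping_results PySem.Set.empty PySem.Set.empty) device_map

-- ===== PRECONDITION & SPEC =====
-- One parent step: the id of the parent that A/B move to from `i`, none where the walk stops.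
-- Used only to state Pre_; it reads the parent pointers of the input, nothing more.
def pvParentStep (device_map : List (Int × List (String × Int))) (i : Int) : Option Int :=
  match (PySem.Dict.mk device_map).get? i with
  | none => none
  | some device =>
    if device = [] then none
    else
      match (PySem.Dict.mk device).get? "parent_id" with
      | none => none
      | some parent_id => if parent_id = 0 then none else some parent_id

def pvChain (device_map : List (Int × List (String × Int))) : Nat → Int → Option Int
  | 0, i => some i
  | k + 1, i =>
    match pvParentStep device_map i with
    | none => none
    | some p => pvChain device_map k p

-- The parent ids visited in the first n steps (cut off at a root).
def pvChainList (device_map : List (Int × List (String × Int))) : Nat → Int → List Int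
  | 0, _ => []
  | k + 1, i =>
    match pvParentStep device_map i with
    | none => []
    | some p => p :: pvChainList device_map k p

-- Whether the registered ping status of id p is "offline".
def pvOff (ping_results : List (Int × String × Int)) (p : Int) : Bool :=
  match (PySem.Dict.mk ping_results).get? p with
  | some r => decide (r.1 = "offline")
  | none => false

-- "A's recursion returns within n steps": the chain reaches a root or an offline parent.
def pvTerm (device_map : List (Int × List (String × Int))) (ping_results : List (Int × String × Int)) (n : Nat) (i : Int) : Prop :=
  pvChain device_map n i = none ∨ ∃ p ∈ pvChainList device_map n i, pvOff ping_results p = true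

-- Pre_ excludes exactly the inputs on which A never returns (RecursionError): parent
-- chains that cycle without reaching a root or an offline ancestor.  (Within
-- device_map.length + 1 steps the chain must repeat a key, so this bound is exact.)
def Pre_is_ancestor_offline_py (device_id : Int) (device_map : List (Int × List (String × Int))) (ping_results : List (Int × String × Int)) : Prop :=
  pvTerm device_map ping_results (device_map.length + 1) device_id

instance (device_id : Int) (device_map : List (Int × List (String × Int))) (ping_results : List (Int × String × Int)) : Decidable (Pre_is_ancestor_offline_py device_id device_map ping_results) := by unfold Pre_is_ancestor_offline_py pvTerm; infer_instance

def pvWitness_is_ancestor_offline_py : Int × (List (Int × List (String × Int))) × (List (Int × String × Int)) :=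
  (1, [(1, [("parent_id", 2)]), (2, [("parent_id", 3)]), (3, [])], [(2, ("offline", 0))])

def Spec_is_ancestor_offline_py (device_id : Int) (device_map : List (Int × List (String × Int))) (ping_results : List (Int × String × Int)) (out : Bool) : Prop := out = is_ancestor_offline_py_alt device_id device_map ping_results
instance (device_id : Int) (device_map : List (Int × List (String × Int))) (ping_results : List (Int × String × Int)) (out : Bool) : Decidable (Spec_is_ancestor_offline_py device_id device_map ping_results out) := by unfold Spec_is_ancestor_offline_py; infer_instance

-- ===== CLAIM (what is proved, stated in full; the proofs are below) =====
def Claim_equal_is_ancestor_offline_py : Prop := ∀ (device_id : Int) (device_map : List (Int × List (String × Int))) (ping_results : List (Int × String × Int)), Dom_is_ancestor_offline_py device_id device_map ping_results → Pre_is_ancestor_offline_py device_id device_map ping_results → Spec_is_ancestor_offline_py device_id device_map ping_results (is_ancestor_offline_py device_id device_map ping_results)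

-- ===== LEMMAS AND PROOFS =====

theorem pvChain_add (dm : List (Int × List (String × Int))) (a b : Nat) (i : Int) :
    pvChain dm (a + b) i = (pvChain dm a i).elim none (pvChain dm b) := by
  induction a generalizing i with
  | zero => simp [pvChain]
  | succ a ih =>
    have : a + 1 + b = (a + b) + 1 := by omega
    rw [this]
    simp only [pvChain]
    cases hs : pvParentStep dm i with
    | none => rfl
    | some p => exact ih p

theorem pvChainList_add (dm : List (Int × List (String × Int))) (a b : Nat) (i : Int) :
    pvChainList dm (a + b) i
      = pvChainList dm a i ++ (pvChain dm a i).elim [] (pvChainList dm b) := by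
  induction a generalizing i with
  | zero => simp [pvChain, pvChainList]
  | succ a ih =>
    have : a + 1 + b = (a + b) + 1 := by omega
    rw [this]
    simp only [pvChain, pvChainList]
    cases hs : pvParentStep dm i with
    | none => simp
    | some p => simp [ih p]

-- A's recursion computes the offline-scan of the (fuel-cut) chain, unconditionally.
theorem go_eq_any (dm : List (Int × List (String × Int))) (pr : List (Int × String × Int)) :
    ∀ (fuel : Nat) (i : Int),
      is_ancestor_offline_go fuel i dm pr = (pvChainList dm fuel i).any (pvOff pr) := by
  intro fuel
  induction fuel with
  | zero => intro i; simp [is_ancestor_offline_go, pvChainList]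
  | succ fuel ih =>
    intro i
    simp only [is_ancestor_offline_go, pvChainList, pvParentStep]
    cases h1 : (PySem.Dict.mk dm).get? i with
    | none => simp
    | some device =>
      by_cases hd : device = []
      · simp [hd]
      · simp only [if_neg hd]
        cases h2 : (PySem.Dict.mk device).get? "parent_id" with
        | none => simp
        | some pid =>
          by_cases hp : pid = 0
          · simp [hp]
          · simp only [if_neg hp]
            cases h3 : (PySem.Dict.mk pr).get? pid with
            | none => simp [pvOff, h3, ih pid]
            | some r =>
              by_cases hr : r.1 = "offline"
              · simp [pvOff, h3, hr]
              · simp [pvOff, h3, hr, ih pid]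

-- The offline set built by alt_offline holds exactly the ids whose first-match
-- ping status is "offline" (and are not shadowed by `ks`), on top of `off`.
theorem alt_offline_mem (pr : List (Int × String × Int)) :
    ∀ (ks off : PySem.Set Int) (x : Int),
      x ∈ alt_offline pr ks off ↔ (x ∈ off ∨ (x ∉ ks ∧ pvOff pr x = true)) := by
  induction pr with
  | nil => intro ks off x; simp [alt_offline, pvOff, PySem.Dict.get?]
  | cons p rest ih =>
    obtain ⟨k, v⟩ := p
    intro ks off x
    have hoff : pvOff ((k, v) :: rest) x
        = if k = x then decide (v.1 = "offline") else pvOff rest x := by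
      simp only [pvOff, PySem.Dict.get?_mk_cons]
      by_cases hx : k = x <;> simp [hx]
    simp only [alt_offline]
    by_cases hks : PySem.Set.contains ks k
    · rw [if_pos hks, ih, hoff]
      have hkks : k ∈ ks := (PySem.Set.contains_iff _ _).1 hks
      by_cases hx : k = x
      · subst hx; simp [hkks]
      · simp [hx]
    · rw [if_neg hks, ih]
      have hkks : k ∉ ks := fun h => hks ((PySem.Set.contains_iff _ _).2 h)
      by_cases hx : k = x
      · subst hx
        rw [hoff]
        constructor
        · rintro (hmem | ⟨hadd, _⟩)
          · by_cases ho : v.1 = "offline"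
            · rw [if_pos ho] at hmem
              rcases (PySem.Set.mem_add _ _ _).1 hmem with h | _
              · exact Or.inl h
              · exact Or.inr ⟨hkks, by simp [ho]⟩
            · rw [if_neg ho] at hmem; exact Or.inl hmem
          · exact absurd ((PySem.Set.mem_add _ _ _).2 (Or.inr rfl)) hadd
        · rintro (hmem | ⟨_, ho⟩)
          · left
            by_cases hov : v.1 = "offline"
            · rw [if_pos hov]; exact (PySem.Set.mem_add _ _ _).2 (Or.inl hmem)
            · rw [if_neg hov]; exact hmem
          · left
            have hov : v.1 = "offline" := by simpa using ho
            rw [if_pos hov]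
            exact (PySem.Set.mem_add _ _ _).2 (Or.inr rfl)
      · rw [hoff, if_neg hx]
        have hne : x ≠ k := fun h => hx h.symm
        have hmoff : ∀ s : PySem.Set Int,
            x ∈ (if v.1 = "offline" then PySem.Set.add s k else s) ↔ x ∈ s := by
          intro s
          by_cases ho : v.1 = "offline"
          · rw [if_pos ho]
            constructor
            · intro h
              rcases (PySem.Set.mem_add _ _ _).1 h with h | h
              · exact h
              · exact absurd h hne
            · exact fun h => (PySem.Set.mem_add _ _ _).2 (Or.inl h)
          · rw [if_neg ho]
        have hmks : x ∈ PySem.Set.add ks k ↔ x ∈ ks := by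
          constructor
          · intro h
            rcases (PySem.Set.mem_add _ _ _).1 h with h | h
            · exact h
            · exact absurd h hne
          · exact fun h => (PySem.Set.mem_add _ _ _).2 (Or.inl h)
        rw [hmoff, hmks]

-- contains form of the above at empty accumulators, the shape walk_eq consumes
theorem alt_offline_contains (pr : List (Int × String × Int)) (x : Int) :
    PySem.Set.contains (alt_offline pr PySem.Set.empty PySem.Set.empty) x = pvOff pr x := by
  by_cases h : pvOff pr x = true
  · rw [(PySem.Set.contains_iff _ _).2
      ((alt_offline_mem pr _ _ x).2 (Or.inr ⟨by simp [PySem.Set.empty], h⟩)), h]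
  · have hb : pvOff pr x = false := by revert h; cases pvOff pr x <;> simp
    have hnm : x ∉ alt_offline pr PySem.Set.empty PySem.Set.empty := by
      intro hm
      rcases (alt_offline_mem pr _ _ x).1 hm with hm | ⟨_, hm⟩
      · simp [PySem.Set.empty] at hm
      · rw [hb] at hm; simp at hm
    revert hnm
    rw [hb]
    cases hc : PySem.Set.contains (alt_offline pr PySem.Set.empty PySem.Set.empty) x
    · simp
    · intro hnm; exact absurd ((PySem.Set.contains_iff _ _).1 hc) hnm

-- B's walk computes the offline-scan of the chain cut at m, where m is the least
-- step count at which A's recursion returns: minimality makes the visited nodes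
-- distinct, so the `seen` guard never fires.
theorem walk_eq (dm : List (Int × List (String × Int))) (pr : List (Int × String × Int))
    (offS : PySem.Set Int) (hoffS : ∀ x, PySem.Set.contains offS x = pvOff pr x) :
    ∀ (m fuel : Nat) (i : Int) (seen : PySem.Set Int),
      m ≤ fuel → pvTerm dm pr m i → (∀ j, j < m → ¬ pvTerm dm pr j i) →
      (∀ (k : Nat) (c : Int), k < m → pvChain dm k i = some c → c ∉ seen) →
      alt_walk fuel i seen offS dm = (pvChainList dm m i).any (pvOff pr) := by
  intro m
  induction m with
  | zero =>
    intro fuel i seen _ hterm _ _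
    rcases hterm with h | ⟨p, hp, _⟩
    · simp [pvChain] at h
    · simp [pvChainList] at hp
  | succ m ih =>
    intro fuel i seen hle hterm hmin hseen
    cases fuel with
    | zero => omega
    | succ fuel =>
      have hi : i ∉ seen := hseen 0 i (by omega) (by simp [pvChain])
      have hic : PySem.Set.contains seen i = false := by
        by_contra hc
        exact hi ((PySem.Set.contains_iff _ _).1 (by revert hc; cases PySem.Set.contains seen i <;> simp))
      simp only [alt_walk, hic]
      rw [if_neg Bool.false_ne_true]
      cases hstep : pvParentStep dm i with
      | none =>
        have hm0 : m = 0 := by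
          by_contra hne
          exact hmin 1 (by omega) (Or.inl (by simp [pvChain, hstep]))
        subst hm0
        have hcl : pvChainList dm (0 + 1) i = [] := by simp [pvChainList, hstep]
        rw [hcl, List.any_nil]
        simp only [pvParentStep] at hstep
        cases h1 : (PySem.Dict.mk dm).get? i with
        | none => simp
        | some device =>
          rw [h1] at hstep
          by_cases hd : device = []
          · simp [hd]
          · simp only [if_neg hd] at hstep ⊢
            cases h2 : (PySem.Dict.mk device).get? "parent_id" with
            | none => simp
            | some pid =>
              rw [h2] at hstep
              by_cases hp : pid = 0
              · simp [hp]
              · simp [hp] at hstep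
      | some pid =>
        -- unpack the step into the concrete guards alt_walk takes
        have hguards : ∃ device, (PySem.Dict.mk dm).get? i = some device ∧ device ≠ [] ∧
            (PySem.Dict.mk device).get? "parent_id" = some pid ∧ pid ≠ 0 := by
          simp only [pvParentStep] at hstep
          cases h1 : (PySem.Dict.mk dm).get? i with
          | none => rw [h1] at hstep; simp at hstep
          | some device =>
            rw [h1] at hstep
            by_cases hd : device = []
            · simp [hd] at hstep
            · simp only [if_neg hd] at hstep
              cases h2 : (PySem.Dict.mk device).get? "parent_id" with
              | none => rw [h2] at hstep; simp at hstep
              | some q =>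
                rw [h2] at hstep
                by_cases hq : q = 0
                · simp [hq] at hstep
                · simp [hq] at hstep
                  exact ⟨device, rfl, hd, hstep ▸ h2, hstep ▸ hq⟩
        obtain ⟨device, h1, hd, h2, hp⟩ := hguards
        rw [h1]
        simp only [if_neg hd, h2, if_neg hp]
        have hchainlist : pvChainList dm (m + 1) i = pid :: pvChainList dm m pid := by
          simp [pvChainList, hstep]
        rw [hchainlist]
        by_cases hoffp : pvOff pr pid = true
        · have hct : PySem.Set.contains offS pid = true := by rw [hoffS]; exact hoffp
          rw [hct, if_pos rfl, List.any_cons, hoffp, Bool.true_or]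
        · have hoffp' : pvOff pr pid = false := by revert hoffp; cases pvOff pr pid <;> simp
          have hcf : PySem.Set.contains offS pid = false := by rw [hoffS]; exact hoffp'
          rw [hcf, if_neg Bool.false_ne_true]
          simp only [List.any_cons, hoffp', Bool.false_or]
          -- m ≥ 1: Term 1 i fails since the step succeeds and pid is not offline
          have hm1 : 1 ≤ m := by
            by_contra h
            have : m = 0 := by omega
            subst this
            rcases hterm with hc | ⟨q, hq, hqo⟩
            · simp [pvChain, hstep] at hc
            · rw [hchainlist] at hq
              simp [pvChainList] at hq
              rw [hq] at hqo
              rw [hqo] at hoffp'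
              simp at hoffp'
          apply ih fuel pid (PySem.Set.add seen i) (by omega)
          · -- Term m pid from Term (m+1) i
            rcases hterm with hc | ⟨q, hq, hqo⟩
            · exact Or.inl (by simpa [pvChain, hstep] using hc)
            · rw [hchainlist] at hq
              rcases List.mem_cons.1 hq with rfl | hq'
              · rw [hqo] at hoffp'; simp at hoffp'
              · exact Or.inr ⟨q, hq', hqo⟩
          · -- minimality transfers to pid
            intro j hj hTj
            apply hmin (j + 1) (by omega)
            rcases hTj with hc | ⟨q, hq, hqo⟩
            · exact Or.inl (by simp [pvChain, hstep, hc])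
            · exact Or.inr ⟨q, by simp [pvChainList, hstep, hq], hqo⟩
          · -- freshness: chain nodes from pid are neither in seen nor equal to i
            intro k c hk hkc hmem
            have hkc' : pvChain dm (k + 1) i = some c := by
              simp [pvChain, hstep, hkc]
            rcases (PySem.Set.mem_add _ _ _).1 hmem with hmem' | rfl
            · exact hseen (k + 1) c (by omega) hkc' hmem'
            · -- the chain returned to i after k+1 ≥ 1 steps: contradicts minimality
              have ha : k + 1 < m + 1 := by omega
              have hb : (m + 1) = (k + 1) + (m - k) := by omega
              rcases hterm with hc | ⟨q, hq, hqo⟩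
              · rw [hb, pvChain_add, hkc'] at hc
                exact hmin (m - k) (by omega) (Or.inl hc)
              · rw [hb, pvChainList_add, hkc'] at hq
                rcases List.mem_append.1 hq with hq' | hq'
                · exact hmin (k + 1) (by omega) (Or.inr ⟨q, hq', hqo⟩)
                · exact hmin (m - k) (by omega) (Or.inr ⟨q, hq', hqo⟩)

-- ===== VERDICT (by name: the statement is the Claim_ definition above) =====
theorem is_ancestor_offline_py_spec : Claim_equal_is_ancestor_offline_py := by
  intro did dm pr _ hpre
  unfold Spec_is_ancestor_offline_py
  haveI : DecidablePred (fun n => pvTerm dm pr n did) := fun n => by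
    unfold pvTerm; infer_instance
  have hex : ∃ n, pvTerm dm pr n did := ⟨dm.length + 1, hpre⟩
  have hm := Nat.find_spec hex
  have hmin : ∀ j, j < Nat.find hex → ¬ pvTerm dm pr j did := fun j hj => Nat.find_min hex hj
  have hmle : Nat.find hex ≤ dm.length + 1 := Nat.find_min' hex hpre
  set m := Nat.find hex with hmdef
  have hoffS : ∀ x, PySem.Set.contains (alt_offline pr PySem.Set.empty PySem.Set.empty) x
      = pvOff pr x := fun x => alt_offline_contains pr x
  have hB : is_ancestor_offline_py_alt did dm pr = (pvChainList dm m did).any (pvOff pr) := by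
    unfold is_ancestor_offline_py_alt
    exact walk_eq dm pr _ hoffS m (dm.length + 2) did PySem.Set.empty (by omega) hm hmin
      (by intro k c _ _ h; simp [PySem.Set.empty] at h)
  have hA : is_ancestor_offline_py did dm pr
      = (pvChainList dm (dm.length + 2) did).any (pvOff pr) := by
    unfold is_ancestor_offline_py
    exact go_eq_any dm pr (dm.length + 2) did
  rw [hA, hB]
  have hsplit : dm.length + 2 = m + (dm.length + 2 - m) := by omega
  rw [hsplit, pvChainList_add]
  rcases hm with hc | ⟨q, hq, hqo⟩
  · rw [hc]; simp
  · simp only [List.any_append]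
    have : (pvChainList dm m did).any (pvOff pr) = true :=
      List.any_eq_true.2 ⟨q, hq, hqo⟩
    simp [this]
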